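-- pv_equiv track=rewrite | github.com/NaveenNS07/project | assignment 4/Odd String Difference.py | odd_string_difference
-- ===== SOURCE A (Python) =====
-- def odd_string_difference(words):
--     def to_difference_array(word):
--         return [ord(word[i + 1]) - ord(word[i]) for i in range(len(word) - 1)]
--
--     difference_arrays = [to_difference_array(word) for word in words]
--
--     difference_count = {}
--     for diff_array in difference_arrays:
--         diff_tuple = tuple(diff_array)
--         if diff_tuple in difference_count:
--             difference_count[diff_tuple] += 1
--         else:
--             difference_count[diff_tuple] = 1
--
--     odd_diff_array = None
--     for diff_array in difference_arrays:
--         if difference_count[tuple(diff_array)] == 1: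
--             odd_diff_array = diff_array
--             break
--
--     for word in words:
--         if to_difference_array(word) == odd_diff_array:
--             return word
-- ===== SOURCE B (Python) =====
-- def odd_string_difference(words):
--     def diffs(w):
--         return [ord(b) - ord(a) for a, b in zip(w, w[1:])]
--
--     ds = [diffs(w) for w in words]
--     for i, w in enumerate(words):
--         if ds[i] not in ds[:i] + ds[i + 1:]:
--             return w
-- ===== Notes on version B (the rewrite author's own statement) =====
-- stated objective: alternative
-- what changed: B uses no dictionary at all: it brute-force checks each word in order, returning the first whose difference array does not occur among the sliced-out remainder ds[:i]+ds[i+1:], replacing A's hash-count construction, odd-array search and recompute-and-compare pass by a single membership scan.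
-- outside the precondition, e.g. on odd_string_difference(['aa', 'bb']): A returns None, B returns None
import Mathlib
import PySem

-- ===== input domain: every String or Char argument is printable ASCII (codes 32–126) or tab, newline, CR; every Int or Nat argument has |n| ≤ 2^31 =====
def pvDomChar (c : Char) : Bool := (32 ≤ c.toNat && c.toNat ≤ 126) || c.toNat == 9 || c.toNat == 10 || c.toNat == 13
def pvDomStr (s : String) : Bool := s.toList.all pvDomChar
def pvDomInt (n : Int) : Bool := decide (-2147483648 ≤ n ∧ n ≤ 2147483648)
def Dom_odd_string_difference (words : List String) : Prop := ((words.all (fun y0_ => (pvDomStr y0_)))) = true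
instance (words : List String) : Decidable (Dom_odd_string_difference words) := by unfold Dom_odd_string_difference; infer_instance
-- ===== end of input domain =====

-- B drops A's count-dict entirely: a dict-free brute-force scan returning the first word
-- whose difference array is absent from ds[:i]+ds[i+1:]; objective: alternative.

-- ===== PORT A =====
-- A's inner helper to_difference_array; the indices i and i+1 produced by
-- range(len(word)-1) are always in bounds, so the '.getD' defaults are never used (exact).
def pvToDiffA (w : List Char) : List Int :=
  (PySem.List.pyRange 0 ((w.length : Int) - 1) 1).map (fun i =>
    (((PySem.List.pyGet? w (i + 1)).getD ' ').toNat : Int)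
      - (((PySem.List.pyGet? w i).getD ' ').toNat : Int))

-- A's counting loop over difference_arrays (d[t] += 1 / d[t] = 1)
def pvCountLoop (ds : List (List Int)) : PySem.Dict (List Int) Int :=
  ds.foldl (fun d t => if d.contains t then d.insert t (d.getD t 0 + 1) else d.insert t 1)
    PySem.Dict.empty

-- A's second loop with 'break'; the key is always present, so 'getD _ 0' is exact.
def pvFindOdd (cnt : PySem.Dict (List Int) Int) : List (List Int) → Option (List Int)
  | [] => none
  | d :: rest => if cnt.getD d 0 = 1 then some d else pvFindOdd cnt rest

-- A's final loop; when nothing matches, Python A falls off and returns None (no String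
-- value) — those inputs are excluded by Pre_ below; "" is the port's placeholder there.
def pvFindWord (odd : Option (List Int)) : List String → String
  | [] => ""
  | w :: rest => if some (pvToDiffA w.toList) = odd then w else pvFindWord odd rest

def odd_string_difference (words : List String) : String :=
  let difference_arrays := words.map (fun w => pvToDiffA w.toList)
  let difference_count := pvCountLoop difference_arrays
  let odd_diff_array := pvFindOdd difference_count difference_arrays
  pvFindWord odd_diff_array words

-- ===== PORT B =====
-- B's diffs(word): zip(word, word[1:])
def pvDiffB (w : String) : List Int :=
  (w.toList.zip (w.toList.drop 1)).map (fun p => ((p.2.toNat : Int) - (p.1.toNat : Int)))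

-- B's 'for i, w in enumerate(words): if ds[i] not in ds[:i] + ds[i+1:]: return w'.
-- The index i is always in range so 'getD []' is exact; "" = Python's None fall-off,
-- excluded by Pre_.
def pvScanB (ds : List (List Int)) : List (Int × String) → String
  | [] => ""
  | (i, w) :: rest =>
      if (PySem.List.pyGet? ds i).getD []
           ∉ PySem.List.slice ds none (some i) ++ PySem.List.slice ds (some (i + 1)) none
      then w else pvScanB ds rest

def odd_string_difference_alt (words : List String) : String :=
  let ds := words.map pvDiffB
  pvScanB ds (PySem.List.enumerate words 0)

-- ===== PRECONDITION & SPEC =====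
-- helper used ONLY by Pre_ (independent of both ports)
def pvDiffP (w : String) : List Int :=
  (w.toList.zip (w.toList.drop 1)).map (fun p => ((p.2.toNat : Int) - (p.1.toNat : Int)))

-- Pre_ excludes inputs with no word of unique difference array, where Python A falls
-- off the final loop and returns None, which is not a String value (B does the same).
def Pre_odd_string_difference (words : List String) : Prop :=
  ∃ w ∈ words, (words.map pvDiffP).count (pvDiffP w) = 1
instance (words : List String) : Decidable (Pre_odd_string_difference words) := by
  unfold Pre_odd_string_difference; infer_instance

def pvWitness_odd_string_difference : List String := ["ab", "aa", "ac"]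

def Spec_odd_string_difference (words : List String) (out : String) : Prop :=
  out = odd_string_difference_alt words
instance (words : List String) (out : String) : Decidable (Spec_odd_string_difference words out) := by
  unfold Spec_odd_string_difference; infer_instance

-- ===== CLAIM (what is proved, stated in full; the proofs are below) =====
def Claim_equal_odd_string_difference : Prop :=
  ∀ (words : List String), Dom_odd_string_difference words →
    Pre_odd_string_difference words →
    Spec_odd_string_difference words (odd_string_difference words)

-- ===== LEMMAS AND PROOFS =====

-- A's index-based difference array equals B's zip-based one
theorem pvToDiffA_eq (w : List Char) :
    pvToDiffA w = (w.zip (w.drop 1)).map (fun p => ((p.2.toNat : Int) - (p.1.toNat : Int))) := by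
  apply List.ext_getElem
  · simp [pvToDiffA, PySem.List.length_pyRange_one]
  · intro k h1 h2
    simp only [pvToDiffA, List.getElem_map, PySem.List.getElem_pyRange_one]
    have hk : k + 1 < w.length := by
      simp [pvToDiffA, PySem.List.length_pyRange_one] at h1; omega
    have e1 : (0 : Int) + (k : Int) + 1 = ((k + 1 : Nat) : Int) := by omega
    have e0 : (0 : Int) + (k : Int) = ((k : Nat) : Int) := by omega
    rw [e1, e0, PySem.List.pyGet?_natCast, PySem.List.pyGet?_natCast]
    simp [List.getElem?_eq_getElem hk, List.getElem?_eq_getElem (by omega : k < w.length),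
      List.getElem_zip]

theorem pvToDiffA_eq_diffB (s : String) : pvToDiffA s.toList = pvDiffB s := by
  rw [pvToDiffA_eq]; rfl

-- A's count dict is a counter
theorem pvCountLoop_getD (ds : List (List Int)) (t : List Int) :
    (pvCountLoop ds).getD t 0 = (ds.count t : Int) := by
  have hstep : pvCountLoop ds
      = ds.foldl (fun d x => d.insert x (d.getD x 0 + 1)) PySem.Dict.empty := by
    unfold pvCountLoop
    congr 1
    funext d x
    by_cases h : d.contains x = true
    · simp [h]
    · have h0 : d.getD x 0 = 0 := by
        unfold PySem.Dict.getD
        rw [(PySem.Dict.get?_eq_none_iff_contains d x).2 (by simpa using h)]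
        rfl
      simp [h, h0]
  rw [hstep, PySem.Dict.foldl_insert_getD_add_one_eq_counter, PySem.Dict.getD_counter]

-- A's custom loops as List.find?
theorem pvFindOdd_eq (cnt : PySem.Dict (List Int) Int) (l : List (List Int)) :
    pvFindOdd cnt l = l.find? (fun d => cnt.getD d 0 == 1) := by
  induction l with
  | nil => rfl
  | cons d rest ih =>
      by_cases h : cnt.getD d 0 = 1
      · simp [pvFindOdd, List.find?, h]
      · have hb : (cnt.getD d 0 == 1) = false := beq_eq_false_iff_ne.2 h
        simp [pvFindOdd, List.find?, h, hb, ih]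

theorem pvFindWord_some (d0 : List Int) (ws : List String) :
    pvFindWord (some d0) ws = (ws.find? (fun w => pvToDiffA w.toList == d0)).getD "" := by
  induction ws with
  | nil => rfl
  | cons w rest ih =>
      by_cases h : pvToDiffA w.toList = d0
      · simp [pvFindWord, List.find?, h]
      · have hb : (pvToDiffA w.toList == d0) = false := beq_eq_false_iff_ne.2 h
        simp [pvFindWord, List.find?, h, hb, ih]

-- B's scan: start-at-k invariant — at entry (k, w) the element ds[k] is pvDiffB w and
-- membership of ds[k] in ds[:k]+ds[k+1:] is exactly 'count ≠ 1'
theorem pvScanB_aux (D : List (List Int)) :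
    ∀ (tail : List String) (k : Nat), D.drop k = tail.map pvDiffB →
      pvScanB D (PySem.List.enumerate tail (k : Int))
        = (tail.find? (fun w => D.count (pvDiffB w) == 1)).getD "" := by
  intro tail
  induction tail with
  | nil => intro k _; simp [pvScanB, PySem.List.enumerate_nil]
  | cons w rest ih =>
      intro k h
      rw [List.map_cons] at h
      have hk : k < D.length := by
        by_contra hge
        rw [List.drop_eq_nil_of_le (by omega)] at h
        cases h
      have hDk : D[k] = pvDiffB w := by
        have := List.drop_eq_getElem_cons hk
        rw [this] at h
        exact (List.cons.injEq _ _ _ _ ▸ h).1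
      have hdrop1 : D.drop (k + 1) = rest.map pvDiffB := by
        have := List.drop_eq_getElem_cons hk
        rw [this] at h
        exact (List.cons.injEq _ _ _ _ ▸ h).2
      have hsplit : D = D.take k ++ D.drop k := (List.take_append_drop k D).symm
      have hcount : D.count (pvDiffB w)
          = (D.take k).count (pvDiffB w) + 1 + (D.drop (k + 1)).count (pvDiffB w) := by
        conv_lhs => rw [hsplit]
        rw [List.count_append, List.drop_eq_getElem_cons hk, hDk, List.count_cons]
        simp only [beq_self_eq_true, if_pos]
        omega
      have hget : (PySem.List.pyGet? D (k : Int)).getD [] = pvDiffB w := by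
        rw [PySem.List.pyGet?_natCast, List.getElem?_eq_getElem hk, hDk]; rfl
      have hsl1 : PySem.List.slice D none (some (k : Int)) = D.take k :=
        PySem.List.slice_to_natCast D k
      have hsl2 : PySem.List.slice D (some ((k : Int) + 1)) none = D.drop (k + 1) := by
        have : (k : Int) + 1 = ((k + 1 : Nat) : Int) := by push_cast; ring
        rw [this, PySem.List.slice_from_natCast]
      rw [PySem.List.enumerate_cons]
      by_cases hmem : pvDiffB w ∈ D.take k ++ D.drop (k + 1)
      · -- duplicated: count ≠ 1, both sides recurse
        have hc : D.count (pvDiffB w) ≠ 1 := by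
          rcases List.mem_append.1 hmem with hm | hm
          · have := List.count_pos_iff.2 hm; omega
          · have := List.count_pos_iff.2 hm; omega
        have hb : (D.count (pvDiffB w) == 1) = false := beq_eq_false_iff_ne.2 hc
        have : pvScanB D (((k : Int), w) :: PySem.List.enumerate rest ((k : Int) + 1))
            = pvScanB D (PySem.List.enumerate rest ((k : Int) + 1)) := by
          simp only [pvScanB, hget, hsl1, hsl2]
          rw [if_neg (not_not.2 hmem)]
        rw [this, List.find?_cons, hb]
        have e : (k : Int) + 1 = ((k + 1 : Nat) : Int) := by push_cast; ring
        rw [e, ih (k + 1) hdrop1]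
      · -- unique: count = 1, both sides return w
        have hc : D.count (pvDiffB w) = 1 := by
          have h1 : (D.take k).count (pvDiffB w) = 0 :=
            List.count_eq_zero.2 (fun hm => hmem (List.mem_append.2 (Or.inl hm)))
          have h2 : (D.drop (k + 1)).count (pvDiffB w) = 0 :=
            List.count_eq_zero.2 (fun hm => hmem (List.mem_append.2 (Or.inr hm)))
          omega
        have : pvScanB D (((k : Int), w) :: PySem.List.enumerate rest ((k : Int) + 1)) = w := by
          simp only [pvScanB, hget, hsl1, hsl2]
          rw [if_pos hmem]
        rw [this, List.find?_cons, beq_iff_eq.2 hc]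
        rfl

-- key lemma: the first word whose diff equals the FIRST diff satisfying p is the
-- first word whose own diff satisfies p
theorem pvFind_shift (p : List Int → Bool) (diff : String → List Int) :
    ∀ (ws : List String) (d0 : List Int), (ws.map diff).find? p = some d0 →
      ws.find? (fun w => diff w == d0) = ws.find? (fun w => p (diff w)) := by
  intro ws
  induction ws with
  | nil => intro d0 h; simp at h
  | cons w rest ih =>
      intro d0 h
      rw [List.map_cons, List.find?_cons] at h
      cases hp : p (diff w) with
      | true =>
          rw [hp] at h
          have hd0 : d0 = diff w := by cases h; rfl
          simp [List.find?, hp, hd0]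
      | false =>
          rw [hp] at h
          have hd0 : p d0 = true := List.find?_some h
          have hne : ¬ diff w = d0 := by
            intro e; rw [e, hd0] at hp; cases hp
          have hb : (diff w == d0) = false := beq_eq_false_iff_ne.2 hne
          simp only [List.find?_cons, hp, hb]
          exact ih d0 h

-- ===== VERDICT (by name: the statement is the Claim_ definition above) =====
theorem odd_string_difference_spec : Claim_equal_odd_string_difference := by
  intro words _ hpre
  unfold Spec_odd_string_difference odd_string_difference odd_string_difference_alt
  have hmap : words.map (fun w => pvToDiffA w.toList) = words.map pvDiffB := by
    exact List.map_congr_left (fun w _ => pvToDiffA_eq_diffB w)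
  set p : List Int → Bool := fun c => (words.map pvDiffB).count c == 1 with hp
  have hpredA : (fun d => (pvCountLoop (words.map pvDiffB)).getD d 0 == 1) = p := by
    funext d
    rw [pvCountLoop_getD, hp]
    simp [Nat.cast_eq_one]
  obtain ⟨w0, hw0mem, hw0cnt⟩ := hpre
  have hw0p : p (pvDiffB w0) = true := by
    rw [hp]; simpa [pvDiffP, pvDiffB] using hw0cnt
  have hsome : ((words.map pvDiffB).find? p).isSome := by
    rw [List.find?_isSome]
    exact ⟨pvDiffB w0, List.mem_map_of_mem hw0mem, hw0p⟩
  obtain ⟨d0, hd0⟩ := Option.isSome_iff_exists.1 hsome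
  -- A side to find? form
  simp only [hmap, pvFindOdd_eq, hpredA, hd0, pvFindWord_some]
  -- B side via the scan invariant at k = 0
  have hB : pvScanB (words.map pvDiffB) (PySem.List.enumerate words 0)
      = (words.find? (fun w => p (pvDiffB w))).getD "" := by
    have h0 : ((0 : Nat) : Int) = (0 : Int) := rfl
    rw [← h0, pvScanB_aux (words.map pvDiffB) words 0 (by simp)]
  rw [hB]
  have hdA : (fun w => pvToDiffA w.toList == d0) = fun w => pvDiffB w == d0 := by
    funext w; rw [pvToDiffA_eq_diffB]
  rw [hdA, pvFind_shift p pvDiffB words d0 hd0]
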